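-- pv_equiv track=rewrite | github.com/anthony-firn/NameCombinations | LastNames.py | combine_sub_list
-- ===== SOURCE A (Python) =====
-- def combine_sub_list(list_1, list_2):
--     combined_sub = []
--     for item_1 in list_1:
--         for front_sub_1 in list_1[item_1][0]:
--             for item_2 in list_2:
--                 for front_sub_2 in list_2[item_2][0]:
--                     combined_sub.append(front_sub_1 + front_sub_2)
--     return combined_sub
-- ===== SOURCE B (Python) =====
-- def combine_sub_list(list_1, list_2):
--     # Flatten each dict into the ordered list of front-substrings, then compute
--     # the k-th output directly by index arithmetic: output[k] = flat_1[k // m] + flat_2[k % m].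
--     flat_1 = [s for item in list_1 for s in list_1[item][0]]
--     flat_2 = [s for item in list_2 for s in list_2[item][0]]
--     m = len(flat_2)
--     return [flat_1[k // m] + flat_2[k % m] for k in range(len(flat_1) * m)]
-- ===== Notes on version B (the rewrite author's own statement) =====
-- stated objective: alternative
-- what changed: B flattens each dict once into an ordered list of front-substrings and then computes each output element directly by index arithmetic (output[k] = flat_1[k // m] + flat_2[k % m] over a single flat range), replacing A's four-level nested dict-lookup loops.
-- outside the precondition, e.g. on combine_sub_list({}, {'a': []}): A returns [], B raises IndexError
import Mathlib
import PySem

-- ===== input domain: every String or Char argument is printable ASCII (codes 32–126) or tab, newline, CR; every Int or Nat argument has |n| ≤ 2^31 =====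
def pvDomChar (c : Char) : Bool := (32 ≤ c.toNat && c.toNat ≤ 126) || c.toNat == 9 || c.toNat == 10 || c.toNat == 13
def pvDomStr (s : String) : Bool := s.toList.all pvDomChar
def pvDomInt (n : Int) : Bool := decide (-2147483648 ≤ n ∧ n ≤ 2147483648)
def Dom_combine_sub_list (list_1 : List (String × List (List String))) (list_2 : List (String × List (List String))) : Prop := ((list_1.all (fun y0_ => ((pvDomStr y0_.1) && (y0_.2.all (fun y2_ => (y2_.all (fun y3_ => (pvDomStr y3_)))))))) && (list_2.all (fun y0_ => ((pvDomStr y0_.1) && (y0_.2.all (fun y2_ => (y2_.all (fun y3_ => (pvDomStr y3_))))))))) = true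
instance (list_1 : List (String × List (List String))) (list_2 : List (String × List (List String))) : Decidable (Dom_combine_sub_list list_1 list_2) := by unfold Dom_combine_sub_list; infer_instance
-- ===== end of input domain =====

-- B replaces A's four-level nested dict-lookup loops by flattening each dict once and
-- computing each output element by index arithmetic over one flat range (same cost).


-- ===== PORT A =====
-- Python 'for item_1 in list_1' iterates dict keys; 'list_1[item_1]' is the dict lookup,
-- ported as first-match lookup on the association list (exact for the unique-key dicts).
def pvLookup : List (String × List (List String)) → String → List (List String)
  | [], _ => []
  | p :: rest, k => if p.1 == k then p.2 else pvLookup rest k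

-- '[0]' ported as headD []; Pre_ excludes the empty lists where Python raises IndexError.
def combine_sub_list (list_1 : List (String × List (List String))) (list_2 : List (String × List (List String))) : List String :=
  list_1.foldl (fun acc p =>
    ((pvLookup list_1 p.1).headD []).foldl (fun acc front_sub_1 =>
      list_2.foldl (fun acc q =>
        ((pvLookup list_2 q.1).headD []).foldl (fun acc front_sub_2 =>
          acc ++ [front_sub_1 ++ front_sub_2]) acc) acc) acc) []

-- ===== PORT B =====
-- flat_1[k // m] / flat_2[k % m]: the indices are always in range for k in the range,
-- so pyGetD with default "" is exact there (Python would raise only out of range).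
def combine_sub_list_alt (list_1 : List (String × List (List String))) (list_2 : List (String × List (List String))) : List String :=
  let flat_1 := list_1.flatMap (fun p => (pvLookup list_1 p.1).headD [])
  let flat_2 := list_2.flatMap (fun q => (pvLookup list_2 q.1).headD [])
  let m : Int := PySem.List.len flat_2
  (PySem.List.pyRange 0 (PySem.List.len flat_1 * m) 1).map
    (fun k => PySem.List.pyGetD flat_1 (PySem.Int.floordiv k m) "" ++
              PySem.List.pyGetD flat_2 (PySem.Int.mod k m) "")

-- ===== PRECONDITION & SPEC =====
-- Pre_ excludes inputs where some dict value is the empty list: Python A raises IndexError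
-- at '[0]' whenever its nested loops reach such a value (B, which flattens both dicts up
-- front, always raises there), and when the loops never reach it A's [] is an accident of
-- lazy traversal that B's eager flattening cannot reproduce.
def Pre_combine_sub_list (list_1 : List (String × List (List String))) (list_2 : List (String × List (List String))) : Prop :=
  (∀ p ∈ list_1, p.2 ≠ []) ∧ (∀ q ∈ list_2, q.2 ≠ [])
instance (list_1 : List (String × List (List String))) (list_2 : List (String × List (List String))) : Decidable (Pre_combine_sub_list list_1 list_2) := by unfold Pre_combine_sub_list; infer_instance

def pvWitness_combine_sub_list : (List (String × List (List String))) × (List (String × List (List String))) :=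
  ([("x", [["ab", "c"], ["zz"]]), ("y", [["d"]])], [("u", [["E"]]), ("v", [["F", "G"]])])

def Spec_combine_sub_list (list_1 : List (String × List (List String))) (list_2 : List (String × List (List String))) (out : List String) : Prop := out = combine_sub_list_alt list_1 list_2
instance (list_1 : List (String × List (List String))) (list_2 : List (String × List (List String))) (out : List String) : Decidable (Spec_combine_sub_list list_1 list_2 out) := by unfold Spec_combine_sub_list; infer_instance

-- ===== CLAIM (what is proved, stated in full; the proofs are below) =====
def Claim_equal_combine_sub_list : Prop := ∀ (list_1 : List (String × List (List String))) (list_2 : List (String × List (List String))), Dom_combine_sub_list list_1 list_2 → Pre_combine_sub_list list_1 list_2 → Spec_combine_sub_list list_1 list_2 (combine_sub_list list_1 list_2)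

-- ===== LEMMAS AND PROOFS =====

-- (range over f1.length * f2.length indexed by divmod) = cartesian concatenation, on the Nat side
theorem pvNatKey (f1 f2 : List String) :
    (List.range (f1.length * f2.length)).map
      (fun t => f1.getD (t / f2.length) "" ++ f2.getD (t % f2.length) "")
    = f1.flatMap (fun a => f2.map (fun b => a ++ b)) := by
  induction f1 with
  | nil => simp
  | cons a f1 ih =>
    rcases Nat.eq_zero_or_pos f2.length with hm | hm
    · simp [List.length_eq_zero_iff.mp hm]
    · have hsplit : (a :: f1).length * f2.length = f2.length + f1.length * f2.length := by
        simp [Nat.succ_mul, Nat.add_comm]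
      rw [hsplit, List.range_add, List.map_append, List.map_map]
      congr 1
      · calc (List.range f2.length).map
              (fun t => (a :: f1).getD (t / f2.length) "" ++ f2.getD (t % f2.length) "")
            = (List.range f2.length).map (fun t => a ++ f2.getD t "") := by
              apply List.map_congr_left
              intro t ht
              rw [List.mem_range] at ht
              rw [Nat.div_eq_of_lt ht, Nat.mod_eq_of_lt ht, List.getD_cons_zero]
          _ = ((List.range f2.length).map (fun t => f2.getD t "")).map (fun b => a ++ b) := by
              rw [List.map_map]; rfl
          _ = f2.map (fun b => a ++ b) := by
              congr 1
              apply List.ext_getElem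
              · simp
              · intro i h1 h2
                simp [List.getD_eq_getElem?_getD, List.getElem?_eq_getElem h2]
      · calc (List.range (f1.length * f2.length)).map
              ((fun t => (a :: f1).getD (t / f2.length) "" ++ f2.getD (t % f2.length) "") ∘
                (f2.length + ·))
            = (List.range (f1.length * f2.length)).map
                (fun t => f1.getD (t / f2.length) "" ++ f2.getD (t % f2.length) "") := by
              apply List.map_congr_left
              intro t _
              show (a :: f1).getD ((f2.length + t) / f2.length) "" ++
                   f2.getD ((f2.length + t) % f2.length) "" = _
              rw [Nat.add_comm f2.length t, Nat.add_div_right _ hm, Nat.add_mod_right,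
                  List.getD_cons_succ]
          _ = f1.flatMap (fun a => f2.map (fun b => a ++ b)) := ih

-- B's range-and-divmod computation equals the flat cartesian concatenation
theorem pvAltKey (f1 f2 : List String) :
    (PySem.List.pyRange 0 (PySem.List.len f1 * PySem.List.len f2) 1).map
      (fun k => PySem.List.pyGetD f1 (PySem.Int.floordiv k (PySem.List.len f2)) "" ++
                PySem.List.pyGetD f2 (PySem.Int.mod k (PySem.List.len f2)) "")
    = f1.flatMap (fun a => f2.map (fun b => a ++ b)) := by
  rw [PySem.List.pyRange_one, List.map_map]
  have hN : ((PySem.List.len f1 * PySem.List.len f2 - 0)).toNat = f1.length * f2.length := by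
    simp [PySem.List.len_eq]
    exact_mod_cast Int.toNat_natCast (f1.length * f2.length)
  rw [hN, ← pvNatKey f1 f2]
  apply List.map_congr_left
  intro t _
  show PySem.List.pyGetD f1 (PySem.Int.floordiv (0 + (t : Int)) (PySem.List.len f2)) "" ++
       PySem.List.pyGetD f2 (PySem.Int.mod (0 + (t : Int)) (PySem.List.len f2)) "" = _
  rw [Int.zero_add, PySem.List.len_eq, PySem.Int.floordiv_natCast, PySem.Int.mod_natCast,
      PySem.List.pyGetD_natCast, PySem.List.pyGetD_natCast]

-- ===== VERDICT (by name: the statement is the Claim_ definition above) =====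
theorem combine_sub_list_spec : Claim_equal_combine_sub_list := by
  intro l1 l2 _ _
  show combine_sub_list l1 l2 = combine_sub_list_alt l1 l2
  unfold combine_sub_list combine_sub_list_alt
  have step2 : ∀ (acc : List String) (a : String),
      l2.foldl (fun acc q =>
        ((pvLookup l2 q.1).headD []).foldl (fun acc b => acc ++ [a ++ b]) acc) acc
      = acc ++ (l2.flatMap (fun q => (pvLookup l2 q.1).headD [])).map (fun b => a ++ b) := by
    intro acc a
    rw [show (fun acc q => ((pvLookup l2 q.1).headD []).foldl
          (fun acc b => acc ++ [a ++ b]) acc)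
        = (fun acc (q : String × List (List String)) =>
            acc ++ ((pvLookup l2 q.1).headD []).map (fun b => a ++ b)) from
      funext fun acc => funext fun q => PySem.List.foldl_append_singleton_eq_map _ _ _]
    rw [PySem.List.foldl_append_eq_flatMap, List.map_flatMap]
  have step1 : ∀ (acc : List String) (fs : List String),
      fs.foldl (fun acc a =>
        l2.foldl (fun acc q =>
          ((pvLookup l2 q.1).headD []).foldl (fun acc b => acc ++ [a ++ b]) acc) acc) acc
      = acc ++ fs.flatMap (fun a =>
          (l2.flatMap (fun q => (pvLookup l2 q.1).headD [])).map (fun b => a ++ b)) := by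
    intro acc fs
    rw [show (fun acc a => l2.foldl (fun acc q => ((pvLookup l2 q.1).headD []).foldl
          (fun acc b => acc ++ [a ++ b]) acc) acc)
        = (fun acc a => acc ++ (l2.flatMap (fun q => (pvLookup l2 q.1).headD [])).map
            (fun b => a ++ b)) from
      funext fun acc => funext fun a => step2 acc a]
    rw [PySem.List.foldl_append_eq_flatMap]
  rw [pvAltKey]
  calc l1.foldl (fun acc p =>
        ((pvLookup l1 p.1).headD []).foldl (fun acc a =>
          l2.foldl (fun acc q =>
            ((pvLookup l2 q.1).headD []).foldl (fun acc b => acc ++ [a ++ b]) acc) acc) acc) []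
      = l1.foldl (fun acc p =>
          acc ++ ((pvLookup l1 p.1).headD []).flatMap (fun a =>
            (l2.flatMap (fun q => (pvLookup l2 q.1).headD [])).map (fun b => a ++ b))) [] := by
        apply PySem.List.foldl_congr_mem
        intro acc p _
        exact step1 acc _
    _ = (l1.flatMap (fun p => (pvLookup l1 p.1).headD [])).flatMap (fun a =>
          (l2.flatMap (fun q => (pvLookup l2 q.1).headD [])).map (fun b => a ++ b)) := by
        rw [PySem.List.foldl_append_eq_flatMap, List.nil_append, List.flatMap_assoc]
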